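-- pv_equiv track=rewrite | github.com/bramcohen/manyana | manyana/conflicts.py | show_conflicts
-- ===== SOURCE A (Python) =====
-- PEACE = 5
--
-- conflict_strings = ['added left', 'added right', 'added both',
--         'deleted left', 'deleted right', 'deleted both']
--
-- END = '>>>>>>> end conflict'
--
-- def show_conflicts(result_lines):
--     final_result = []
--     last_state = PEACE
--     for line, new_state in result_lines:
--         if new_state == PEACE:
--             if last_state != PEACE:
--                 final_result.append(END)
--         elif last_state == PEACE:
--             final_result.append('<<<<<<< begin ' + conflict_strings[new_state])
--         elif last_state != new_state:
--             final_result.append('======= begin ' + conflict_strings[new_state])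
--         final_result.append(line)
--         last_state = new_state
--     if last_state != PEACE:
--         final_result.append(END)
--     return final_result
-- ===== SOURCE B (Python) =====
-- PEACE = 5
--
-- conflict_strings = ['added left', 'added right', 'added both',
--         'deleted left', 'deleted right', 'deleted both']
--
-- END = '>>>>>>> end conflict'
--
-- def show_conflicts(result_lines):
--     # Run-based decomposition: scan maximal runs of equal state and emit one
--     # marker per run boundary instead of deciding markers per line.
--     out = []
--     prev = PEACE
--     i = 0
--     n = len(result_lines)
--     while i < n:
--         st = result_lines[i][1]
--         j = i
--         while j < n and result_lines[j][1] == st: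
--             j += 1
--         if st == PEACE:
--             if prev != PEACE:
--                 out.append(END)
--         elif prev == PEACE:
--             out.append('<<<<<<< begin ' + conflict_strings[st])
--         else:
--             out.append('======= begin ' + conflict_strings[st])
--         out.extend(line for line, _ in result_lines[i:j])
--         prev = st
--         i = j
--     if prev != PEACE:
--         out.append(END)
--     return out
-- ===== Notes on version B (the rewrite author's own statement) =====
-- stated objective: alternative
-- what changed: B scans maximal runs of equal state with an inner index scan and emits one marker per run boundary, instead of A's per-line transition test against the previous line's state.
import Mathlib
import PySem

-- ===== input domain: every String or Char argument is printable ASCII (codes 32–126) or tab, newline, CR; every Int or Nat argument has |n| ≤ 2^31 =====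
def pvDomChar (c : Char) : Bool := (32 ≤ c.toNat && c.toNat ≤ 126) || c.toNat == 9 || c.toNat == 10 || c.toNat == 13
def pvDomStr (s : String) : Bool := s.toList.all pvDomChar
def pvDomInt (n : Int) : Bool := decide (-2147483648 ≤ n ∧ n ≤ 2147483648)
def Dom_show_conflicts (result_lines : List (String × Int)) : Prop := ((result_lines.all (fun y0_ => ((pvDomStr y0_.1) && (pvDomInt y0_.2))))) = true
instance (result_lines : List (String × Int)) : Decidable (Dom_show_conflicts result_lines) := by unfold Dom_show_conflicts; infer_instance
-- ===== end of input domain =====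

-- B emits markers per maximal run of equal state (inner index scan) instead of A's per-line transition test; same output, stated as an alternative decomposition.

def pvConflictStrings : List String :=
  ["added left", "added right", "added both", "deleted left", "deleted right", "deleted both"]

def pvEND : String := ">>>>>>> end conflict"

-- ===== PORT A =====
-- conflict_strings[new_state]: pyGet? is Python indexing (negative from the end, none = IndexError);
-- Pre_ restricts to inputs where it is `some`, the `getD ""` default is never reached there.
def pvStepA (s : List String × Int) (p : String × Int) : List String × Int :=
  let final_result := s.1
  let last_state := s.2
  let line := p.1
  let new_state := p.2
  let final_result :=
    if new_state == 5 then
      (if last_state != 5 then final_result ++ [pvEND] else final_result)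
    else if last_state == 5 then
      final_result ++ ["<<<<<<< begin " ++ (PySem.List.pyGet? pvConflictStrings new_state).getD ""]
    else if last_state != new_state then
      final_result ++ ["======= begin " ++ (PySem.List.pyGet? pvConflictStrings new_state).getD ""]
    else final_result
  (final_result ++ [line], new_state)

def show_conflicts (result_lines : List (String × Int)) : List String :=
  let r := result_lines.foldl pvStepA ([], 5)
  if r.2 != 5 then r.1 ++ [pvEND] else r.1

-- ===== PORT B =====
-- inner `while j < n and result_lines[j][1] == st: j += 1`
def pvScanRun (rl : List (String × Int)) (st : Int) (j : Nat) : Nat :=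
  if h : j < rl.length then
    if rl[j].2 == st then pvScanRun rl st (j + 1) else j
  else j
termination_by rl.length - j

theorem pvScanRun_ge (rl : List (String × Int)) (st : Int) (j : Nat) :
    j ≤ pvScanRun rl st j := by
  unfold pvScanRun
  split
  · split
    · exact le_trans (Nat.le_succ j) (pvScanRun_ge rl st (j + 1))
    · exact le_rfl
  · exact le_rfl
termination_by rl.length - j

theorem pvScanRun_gt (rl : List (String × Int)) (j : Nat) (h : j < rl.length) :
    j < pvScanRun rl (rl[j].2) j := by
  unfold pvScanRun
  simp only [h, dif_pos, beq_self_eq_true, if_pos]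
  exact lt_of_lt_of_le (Nat.lt_succ_self j) (pvScanRun_ge rl (rl[j].2) (j + 1))

-- outer `while i < n` loop of B
def pvOuterB (rl : List (String × Int)) (prev : Int) (i : Nat) (out : List String) : List String :=
  if h : i < rl.length then
    let st := rl[i].2
    let j := pvScanRun rl st i
    let out :=
      if st == 5 then
        (if prev != 5 then out ++ [pvEND] else out)
      else if prev == 5 then
        out ++ ["<<<<<<< begin " ++ (PySem.List.pyGet? pvConflictStrings st).getD ""]
      else
        out ++ ["======= begin " ++ (PySem.List.pyGet? pvConflictStrings st).getD ""]
    pvOuterB rl st j (out ++ ((rl.drop i).take (j - i)).map Prod.fst)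
  else if prev != 5 then out ++ [pvEND] else out
termination_by rl.length - i
decreasing_by exact Nat.sub_lt_sub_left h (pvScanRun_gt rl i h)

def show_conflicts_alt (result_lines : List (String × Int)) : List String :=
  pvOuterB result_lines 5 0 []

-- ===== PRECONDITION & SPEC =====
-- Pre_ excludes exactly the inputs on which A raises IndexError: a non-PEACE state outside
-- Python's index range -6..5 of the 6-element conflict_strings list (B raises there too).
def Pre_show_conflicts (result_lines : List (String × Int)) : Prop :=
  ∀ p ∈ result_lines, -6 ≤ p.2 ∧ p.2 ≤ 5
instance (result_lines : List (String × Int)) : Decidable (Pre_show_conflicts result_lines) := by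
  unfold Pre_show_conflicts; infer_instance

def pvWitness_show_conflicts : (List (String × Int)) := [("a", 0), ("b", 5), ("c", 3), ("d", 3)]

def Spec_show_conflicts (result_lines : List (String × Int)) (out : List String) : Prop := out = show_conflicts_alt result_lines
instance (result_lines : List (String × Int)) (out : List String) : Decidable (Spec_show_conflicts result_lines out) := by unfold Spec_show_conflicts; infer_instance

-- ===== CLAIM (what is proved, stated in full; the proofs are below) =====
def Claim_equal_show_conflicts : Prop := ∀ (result_lines : List (String × Int)), Dom_show_conflicts result_lines → Pre_show_conflicts result_lines → Spec_show_conflicts result_lines (show_conflicts result_lines)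

-- ===== LEMMAS AND PROOFS =====

theorem pvDWhead {α : Type} (p : α → Bool) (l : List α) (x : α) (tl : List α)
    (h : l.dropWhile p = x :: tl) : p x = false := by
  induction l with
  | nil => simp at h
  | cons a t ih =>
    rw [List.dropWhile_cons] at h
    split at h
    · exact ih h
    · rename_i hp
      cases h
      simpa using hp

theorem pvTakeLenTW {α : Type} (p : α → Bool) (l : List α) :
    l.take (l.takeWhile p).length = l.takeWhile p := by
  induction l with
  | nil => simp
  | cons a tl ih =>
    rw [List.takeWhile_cons]
    split
    · simpa using ih
    · simp

-- marker A appends before a line with state s when the previous state was prev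
def pvMarker (prev s : Int) : List String :=
  if s == 5 then (if prev != 5 then [pvEND] else [])
  else if prev == 5 then ["<<<<<<< begin " ++ (PySem.List.pyGet? pvConflictStrings s).getD ""]
  else if prev != s then ["======= begin " ++ (PySem.List.pyGet? pvConflictStrings s).getD ""]
  else []

-- recursive characterisation of A's loop body output from state prev
def pvAux (prev : Int) : List (String × Int) → List String
  | [] => if prev != 5 then [pvEND] else []
  | (l, s) :: tl => pvMarker prev s ++ [l] ++ pvAux s tl

theorem pvStepA_eq (acc : List String) (prev : Int) (p : String × Int) :
    pvStepA (acc, prev) p = (acc ++ pvMarker prev p.2 ++ [p.1], p.2) := by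
  unfold pvStepA pvMarker
  rcases p with ⟨l, s⟩
  by_cases h5 : s == 5 <;> by_cases hp : prev == 5 <;>
    simp [h5, hp, bne] <;> split <;> simp

theorem pvFoldA_eq (l : List (String × Int)) : ∀ (acc : List String) (prev : Int),
    (let r := l.foldl pvStepA (acc, prev); if r.2 != 5 then r.1 ++ [pvEND] else r.1)
      = acc ++ pvAux prev l := by
  induction l with
  | nil =>
    intro acc prev
    simp only [List.foldl_nil, pvAux]
    split <;> simp
  | cons p tl ih =>
    intro acc prev
    rcases p with ⟨ln, s⟩
    simp only [List.foldl_cons, pvStepA_eq, pvAux]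
    rw [ih]
    simp

theorem show_conflicts_eq_aux (rl : List (String × Int)) :
    show_conflicts rl = pvAux 5 rl := by
  unfold show_conflicts
  simpa using pvFoldA_eq rl [] 5

-- within a run (all states = st) A appends no marker
theorem pvAux_run (st : Int) (run rest : List (String × Int))
    (h : ∀ p ∈ run, p.2 = st) :
    pvAux st (run ++ rest) = run.map Prod.fst ++ pvAux st rest := by
  induction run with
  | nil => simp
  | cons p tl ih =>
    rcases p with ⟨l, s⟩
    have hs : s = st := h (l, s) (List.mem_cons_self)
    subst hs
    simp only [List.cons_append, pvAux, List.map_cons]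
    rw [ih (fun q hq => h q (List.mem_cons_of_mem _ hq))]
    have hm : pvMarker s s = [] := by
      unfold pvMarker
      by_cases h5 : s == 5 <;> simp [h5, bne]
    simp [hm]

theorem pvScanRun_eq (rl : List (String × Int)) (st : Int) : ∀ (j : Nat),
    pvScanRun rl st j = j + ((rl.drop j).takeWhile (fun p => p.2 == st)).length := by
  intro j
  unfold pvScanRun
  split
  · rename_i h
    have hdrop : rl.drop j = rl[j] :: rl.drop (j + 1) := List.drop_eq_getElem_cons h
    split
    · rename_i hst
      rw [pvScanRun_eq rl st (j + 1), hdrop, List.takeWhile_cons]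
      simp [hst]
      omega
    · rename_i hst
      rw [hdrop, List.takeWhile_cons_of_neg (by simpa using hst)]
      simp
  · rename_i h
    rw [List.drop_eq_nil_of_le (by omega)]
    simp
termination_by j => rl.length - j

theorem pvOuterB_eq (rl : List (String × Int)) : ∀ (k : Nat) (prev : Int) (i : Nat) (out : List String),
    rl.length - i ≤ k →
    (∀ h : i < rl.length, prev = 5 ∨ rl[i].2 ≠ prev) →
    pvOuterB rl prev i out = out ++ pvAux prev (rl.drop i) := by
  intro k
  induction k with
  | zero =>
    intro prev i out hk _
    have hge : rl.length ≤ i := by omega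
    unfold pvOuterB
    rw [dif_neg (by omega), List.drop_eq_nil_of_le hge]
    simp only [pvAux]
    split <;> simp
  | succ k ih =>
    intro prev i out hk hinv
    unfold pvOuterB
    split
    · rename_i h
      set st := rl[i].2 with hst
      set j := pvScanRun rl st i with hj
      have hji : i < j := pvScanRun_gt rl i h
      have hjeq : j = i + ((rl.drop i).takeWhile (fun p => p.2 == st)).length :=
        pvScanRun_eq rl st i
      -- decompose drop i
      have hdrop : rl.drop i = rl[i] :: rl.drop (i + 1) := List.drop_eq_getElem_cons h
      set tw := (rl.drop (i + 1)).takeWhile (fun p => p.2 == st) with htw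
      set dw := (rl.drop (i + 1)).dropWhile (fun p => p.2 == st) with hdw
      have htwdw : rl.drop (i + 1) = tw ++ dw := (List.takeWhile_append_dropWhile).symm
      have htw0 : (rl.drop i).takeWhile (fun p => p.2 == st) = rl[i] :: tw := by
        rw [hdrop, List.takeWhile_cons]
        simp only [← hst, beq_self_eq_true, if_true]
        rw [htw]
      have hjlen : j = i + 1 + tw.length := by
        rw [hjeq, htw0]; simp; omega
      -- the run slice
      have hslice : (rl.drop i).take (j - i) = rl[i] :: tw := by
        have : j - i = (rl[i] :: tw).length := by simp [hjlen]; omega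
        rw [this, ← htw0]
        exact pvTakeLenTW _ _
      -- drop j = dw
      have hdropj : rl.drop j = dw := by
        have : rl.drop j = (rl.drop (i + 1)).drop (j - (i + 1)) := by
          rw [List.drop_drop]; congr 1; omega
        rw [this, htwdw]
        have : j - (i + 1) = tw.length := by omega
        rw [this, List.drop_left' rfl]
      -- pvAux prev (drop i) = marker ++ line ++ map fst tw ++ pvAux st dw
      have htwst : ∀ p ∈ tw, p.2 = st := by
        intro p hp
        have := List.mem_takeWhile_imp (htw ▸ hp)
        simpa using this
      have haux : pvAux prev (rl.drop i)
          = pvMarker prev st ++ (rl[i] :: tw).map Prod.fst ++ pvAux st dw := by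
        rw [hdrop, htwdw]
        show pvAux prev ((rl[i].1, rl[i].2) :: (tw ++ dw)) = _
        rw [← hst]
        simp only [pvAux]
        rw [pvAux_run st tw dw htwst]
        simp
      -- markers agree given the invariant
      have hminv : prev = 5 ∨ st ≠ prev := hinv h
      have hmark : (if st == 5 then (if prev != 5 then out ++ [pvEND] else out)
          else if prev == 5 then out ++ ["<<<<<<< begin " ++ (PySem.List.pyGet? pvConflictStrings st).getD ""]
          else out ++ ["======= begin " ++ (PySem.List.pyGet? pvConflictStrings st).getD ""])
          = out ++ pvMarker prev st := by
        unfold pvMarker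
        by_cases h5 : st = 5
        · simp only [h5, beq_self_eq_true, if_true, bne]
          split <;> simp
        · have h5' : (st == 5) = false := by simpa using h5
          by_cases hp : prev = 5
          · simp [h5', hp]
          · have hp' : (prev == 5) = false := by simpa using hp
            have hne : st ≠ prev := by
              rcases hminv with h' | h'
              · exact absurd h' hp
              · exact h'
            simp [h5', hp', bne, Ne.symm hne]
      -- invariant at the next call
      have hinv' : ∀ h' : j < rl.length, st = 5 ∨ rl[j].2 ≠ st := by
        intro h'
        right
        have hq : rl.drop j = rl[j] :: rl.drop (j + 1) := List.drop_eq_getElem_cons h'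
        rw [hdropj, hdw] at hq
        have := pvDWhead (fun p => p.2 == st) (rl.drop (i + 1)) rl[j] (rl.drop (j + 1)) hq
        simpa using this
      dsimp only
      rw [hmark, ← hj, hslice,
        ih st j (out ++ pvMarker prev st ++ (rl[i] :: tw).map Prod.fst) (by omega) hinv',
        hdropj, haux]
      simp
    · rename_i h
      rw [List.drop_eq_nil_of_le (by omega)]
      simp only [pvAux]
      split <;> simp

-- ===== VERDICT (by name: the statement is the Claim_ definition above) =====
theorem show_conflicts_spec : Claim_equal_show_conflicts := by
  intro rl _ _
  unfold Spec_show_conflicts show_conflicts_alt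
  rw [show_conflicts_eq_aux,
    pvOuterB_eq rl rl.length 5 0 [] (by omega) (fun h => Or.inl rfl)]
  simp
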